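-- pv_equiv track=rewrite | github.com/Stardusted1/ORO | func/functions.py | GetCentrs
-- ===== SOURCE A (Python) =====
-- from math import ceil, floor, sqrt
--
-- def GetMaxMin_Y_X(obj) -> list:
--     maxX = obj[0][1]
--     minX = obj[0][1]
--     maxY = max(obj)[0]
--     minY = min(obj)[0]
--     for x in obj:
--         if x[1] >= maxX:
--             maxX = x[1]
--         if x[1] <= minX:
--             minX = x[1]
--     return [[maxY, maxX], [minY, minX]]
--
-- def GetCentrs(objects: list, baseResolution: tuple, endResolution: tuple) -> list:
--     y_modifier = baseResolution[0] / endResolution[0]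
--     x_modifier = baseResolution[1] / endResolution[1]
--
--     centers = []
--     for x in objects:
--         MaxMin = GetMaxMin_Y_X(x)
--
--         centrX = MaxMin[1][1] + floor(((MaxMin[0][1] - MaxMin[1][1]) * 1) / 2)
--         centrY = MaxMin[1][0] + floor(((MaxMin[0][0] - MaxMin[1][0]) * 1) / 2)
--         centers.insert(len(centers), [centrY - 1, centrX + 1])
--     return centers
-- ===== SOURCE B (Python) =====
-- def GetCentrs(objects: list, baseResolution: tuple, endResolution: tuple) -> list:
--     # Sort-based bounding box: per object, sort the y- and x-coordinates and read
--     # the extremes off the ends of the sorted lists (A scans each object three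
--     # times for running min/max via a helper).  A's two float "modifiers" are
--     # dead values and are dropped.
--     centers = []
--     for obj in objects:
--         ys = sorted(p[0] for p in obj)
--         xs = sorted(p[1] for p in obj)
--         centers.append([ys[0] + (ys[-1] - ys[0]) // 2 - 1,
--                         xs[0] + (xs[-1] - xs[0]) // 2 + 1])
--     return centers
-- ===== Notes on version B (the rewrite author's own statement) =====
-- stated objective: alternative
-- what changed: B finds each object's bounding box by sorting the list of y-coordinates and the list of x-coordinates and reading the extremes off the two ends of each sorted list, instead of A's running min/max scans (lexicographic max(obj)/min(obj) plus a separate X loop through a helper); the dead float modifier computations are dropped.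
import Mathlib
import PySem

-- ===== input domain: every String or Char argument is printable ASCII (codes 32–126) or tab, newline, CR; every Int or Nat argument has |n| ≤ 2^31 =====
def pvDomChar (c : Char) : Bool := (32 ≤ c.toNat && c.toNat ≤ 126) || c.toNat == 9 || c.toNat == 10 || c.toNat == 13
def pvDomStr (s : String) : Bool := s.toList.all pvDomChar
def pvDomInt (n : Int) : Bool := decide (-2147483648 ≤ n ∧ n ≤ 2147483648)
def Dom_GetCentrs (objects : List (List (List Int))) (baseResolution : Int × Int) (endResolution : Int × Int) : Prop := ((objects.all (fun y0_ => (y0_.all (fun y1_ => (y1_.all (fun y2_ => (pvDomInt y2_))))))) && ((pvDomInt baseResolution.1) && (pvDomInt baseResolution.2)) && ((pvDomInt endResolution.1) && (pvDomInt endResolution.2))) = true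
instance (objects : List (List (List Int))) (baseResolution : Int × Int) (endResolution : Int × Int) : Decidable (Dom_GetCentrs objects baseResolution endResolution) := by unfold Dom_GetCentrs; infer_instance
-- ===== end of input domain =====

-- B computes each object's bounding box by sorting the y- and x-coordinate lists and
-- taking their ends (and drops A's dead float "modifier" computations), instead of A's
-- running min/max scans; an alternative algorithm, not claimed faster.

-- ===== PORT A =====
-- Python's `<` on list[int]: lexicographic (used by max(obj)/min(obj)); exact.
def pyLtList : List Int → List Int → Bool
  | [], [] => false
  | [], _ :: _ => true
  | _ :: _, [] => false
  | a :: as, b :: bs => a < b || (a == b && pyLtList as bs)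

-- max(obj): first maximal element, running-maximum loop; none = ValueError on [] (unreachable: obj[0] is read first).
def pyMaxListA : List (List Int) → Option (List Int)
  | [] => none
  | h :: t => some (t.foldl (fun m x => if pyLtList m x then x else m) h)

def pyMinListA : List (List Int) → Option (List Int)
  | [] => none
  | h :: t => some (t.foldl (fun m x => if pyLtList x m then x else m) h)

-- GetMaxMin_Y_X; none = IndexError (empty obj, or a point of length < 2), excluded by Pre_.
def GetMaxMin_Y_X (obj : List (List Int)) : Option (List (List Int)) := do
  let p0 ← PySem.List.pyGet? obj 0
  let startX ← PySem.List.pyGet? p0 1          -- maxX = minX = obj[0][1]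
  let mx ← pyMaxListA obj
  let maxY ← PySem.List.pyGet? mx 0            -- max(obj)[0]
  let mn ← pyMinListA obj
  let minY ← PySem.List.pyGet? mn 0            -- min(obj)[0]
  let st ← obj.foldlM (fun (st : Int × Int) x => do
      let x1 ← PySem.List.pyGet? x 1
      pure ((if st.1 ≤ x1 then x1 else st.1), (if x1 ≤ st.2 then x1 else st.2))) (startX, startX)
  pure [[maxY, st.1], [minY, st.2]]

-- y_modifier/x_modifier are unused float divisions: they affect nothing except raising
-- ZeroDivisionError when an endResolution component is 0 (excluded by Pre_), so they are
-- not modelled.  floor(((a-b)*1)/2): float division of ints this size by 2 is exact, so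
-- it equals (a-b)*1 // 2 = PySem.Int.floordiv ((a-b)*1) 2.
def GetCentrs (objects : List (List (List Int))) (baseResolution : Int × Int) (endResolution : Int × Int) : List (List Int) :=
  objects.foldl (fun centers x =>
    match GetMaxMin_Y_X x with
    | none => centers          -- IndexError, excluded by Pre_
    | some mm =>
      let centrX := (mm.getD 1 []).getD 1 0 + PySem.Int.floordiv (((mm.getD 0 []).getD 1 0 - (mm.getD 1 []).getD 1 0) * 1) 2
      let centrY := (mm.getD 1 []).getD 0 0 + PySem.Int.floordiv (((mm.getD 0 []).getD 0 0 - (mm.getD 1 []).getD 0 0) * 1) 2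
      centers ++ [[centrY - 1, centrX + 1]])   -- centers.insert(len(centers), …) = append
    []

-- ===== PORT B =====
-- p[0]/p[1] are in range under Pre_ (the getD defaults only fire outside it);
-- ys[0]/ys[-1]/xs[0]/xs[-1] read via head?/getLast? — none = IndexError on an empty object, excluded by Pre_.
def bCenter (obj : List (List Int)) : List Int :=
  let ys := PySem.List.sorted (obj.map (fun p => p.getD 0 0)) (fun v => v) false
  let xs := PySem.List.sorted (obj.map (fun p => p.getD 1 0)) (fun v => v) false
  match ys.head?, ys.getLast?, xs.head?, xs.getLast? with
  | some a, some b, some c, some d =>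
      [a + PySem.Int.floordiv (b - a) 2 - 1, c + PySem.Int.floordiv (d - c) 2 + 1]
  | _, _, _, _ => []

def GetCentrs_alt (objects : List (List (List Int))) (baseResolution : Int × Int) (endResolution : Int × Int) : List (List Int) :=
  objects.map bCenter

-- ===== PRECONDITION & SPEC =====
-- Pre_ excludes exactly the inputs where A raises: ZeroDivisionError (a zero endResolution
-- component, in the unused modifier computation) or IndexError (an empty object, or a
-- point with fewer than 2 coordinates).
def Pre_GetCentrs (objects : List (List (List Int))) (baseResolution : Int × Int) (endResolution : Int × Int) : Prop :=
  endResolution.1 ≠ 0 ∧ endResolution.2 ≠ 0 ∧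
  ∀ obj ∈ objects, obj ≠ [] ∧ ∀ p ∈ obj, 2 ≤ p.length
instance (objects : List (List (List Int))) (baseResolution : Int × Int) (endResolution : Int × Int) : Decidable (Pre_GetCentrs objects baseResolution endResolution) := by unfold Pre_GetCentrs; infer_instance

def pvWitness_GetCentrs : List (List (List Int)) × (Int × Int) × (Int × Int) :=
  ([[[0, 1], [4, 3]], [[2, 2]]], (10, 10), (5, 5))

def Spec_GetCentrs (objects : List (List (List Int))) (baseResolution : Int × Int) (endResolution : Int × Int) (out : List (List Int)) : Prop := out = GetCentrs_alt objects baseResolution endResolution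
instance (objects : List (List (List Int))) (baseResolution : Int × Int) (endResolution : Int × Int) (out : List (List Int)) : Decidable (Spec_GetCentrs objects baseResolution endResolution out) := by unfold Spec_GetCentrs; infer_instance

-- ===== CLAIM (what is proved, stated in full; the proofs are below) =====
def Claim_equal_GetCentrs : Prop := ∀ (objects : List (List (List Int))) (baseResolution : Int × Int) (endResolution : Int × Int), Dom_GetCentrs objects baseResolution endResolution → Pre_GetCentrs objects baseResolution endResolution → Spec_GetCentrs objects baseResolution endResolution (GetCentrs objects baseResolution endResolution)


-- ===== LEMMAS AND PROOFS =====

theorem pyGet0 (p : List Int) (h : p ≠ []) : PySem.List.pyGet? p 0 = some (p.getD 0 0) := by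
  match p, h with
  | a :: t, _ => simp

theorem pyGet1 (p : List Int) (h : 2 ≤ p.length) : PySem.List.pyGet? p 1 = some (p.getD 1 0) := by
  match p, h with
  | a :: b :: t, _ =>
    rw [show (1 : Int) = ((1 : Nat) : Int) by norm_num, PySem.List.pyGet?_natCast]
    simp

theorem maxstep_head (m x : List Int) (hm : m ≠ []) (hx : x ≠ []) :
    (if pyLtList m x then x else m).getD 0 0 = max (m.getD 0 0) (x.getD 0 0) := by
  match m, x, hm, hx with
  | a :: as, b :: bs, _, _ =>
    by_cases h : pyLtList (a :: as) (b :: bs) = true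
    · rw [if_pos h]
      simp only [pyLtList, Bool.or_eq_true, decide_eq_true_eq, Bool.and_eq_true, beq_iff_eq] at h
      simp only [List.getD_cons_zero]
      omega
    · rw [if_neg h]
      simp only [pyLtList, Bool.or_eq_true, decide_eq_true_eq, Bool.and_eq_true, beq_iff_eq,
        not_or, not_and] at h
      simp only [List.getD_cons_zero]
      omega

theorem minstep_head (m x : List Int) (hm : m ≠ []) (hx : x ≠ []) :
    (if pyLtList x m then x else m).getD 0 0 = min (m.getD 0 0) (x.getD 0 0) := by
  match m, x, hm, hx with
  | a :: as, b :: bs, _, _ =>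
    by_cases h : pyLtList (b :: bs) (a :: as) = true
    · rw [if_pos h]
      simp only [pyLtList, Bool.or_eq_true, decide_eq_true_eq, Bool.and_eq_true, beq_iff_eq] at h
      simp only [List.getD_cons_zero]
      omega
    · rw [if_neg h]
      simp only [pyLtList, Bool.or_eq_true, decide_eq_true_eq, Bool.and_eq_true, beq_iff_eq,
        not_or, not_and] at h
      simp only [List.getD_cons_zero]
      omega

theorem maxfold (l : List (List Int)) : ∀ (m : List Int), m ≠ [] → (∀ p ∈ l, p ≠ []) →
    (l.foldl (fun m x => if pyLtList m x then x else m) m) ≠ [] ∧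
    (l.foldl (fun m x => if pyLtList m x then x else m) m).getD 0 0
      = l.foldl (fun a p => max a (p.getD 0 0)) (m.getD 0 0) := by
  induction l with
  | nil => intro m hm _; exact ⟨hm, rfl⟩
  | cons h t ih =>
    intro m hm hl
    have hh : h ≠ [] := hl h (by simp)
    have hstep : (if pyLtList m h then h else m) ≠ [] := by split_ifs <;> assumption
    have huse := ih (if pyLtList m h then h else m) hstep (fun p hp => hl p (by simp [hp]))
    simp only [List.foldl_cons]
    exact ⟨huse.1, by rw [huse.2, maxstep_head m h hm hh]⟩

theorem minfold (l : List (List Int)) : ∀ (m : List Int), m ≠ [] → (∀ p ∈ l, p ≠ []) →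
    (l.foldl (fun m x => if pyLtList x m then x else m) m) ≠ [] ∧
    (l.foldl (fun m x => if pyLtList x m then x else m) m).getD 0 0
      = l.foldl (fun a p => min a (p.getD 0 0)) (m.getD 0 0) := by
  induction l with
  | nil => intro m hm _; exact ⟨hm, rfl⟩
  | cons h t ih =>
    intro m hm hl
    have hh : h ≠ [] := hl h (by simp)
    have hstep : (if pyLtList h m then h else m) ≠ [] := by split_ifs <;> assumption
    have huse := ih (if pyLtList h m then h else m) hstep (fun p hp => hl p (by simp [hp]))
    simp only [List.foldl_cons]
    exact ⟨huse.1, by rw [huse.2, minstep_head m h hm hh]⟩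

theorem xpair (l : List (List Int)) : ∀ u v : Int,
    l.foldl (fun (st : Int × Int) p =>
        ((if st.1 ≤ p.getD 1 0 then p.getD 1 0 else st.1),
         (if p.getD 1 0 ≤ st.2 then p.getD 1 0 else st.2))) (u, v)
    = (l.foldl (fun a p => max a (p.getD 1 0)) u, l.foldl (fun a p => min a (p.getD 1 0)) v) := by
  induction l with
  | nil => intro u v; rfl
  | cons h t ih =>
    intro u v
    simp only [List.foldl_cons]
    rw [show (if u ≤ h.getD 1 0 then h.getD 1 0 else u) = max u (h.getD 1 0) by split_ifs <;> omega,
      show (if h.getD 1 0 ≤ v then h.getD 1 0 else v) = min v (h.getD 1 0) by split_ifs <;> omega]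
    exact ih _ _

theorem xloopM (l : List (List Int)) : ∀ (st : Int × Int), (∀ p ∈ l, 2 ≤ p.length) →
    (List.foldlM (m := Option) (fun (st : Int × Int) x => do
        let x1 ← PySem.List.pyGet? x 1
        pure ((if st.1 ≤ x1 then x1 else st.1), (if x1 ≤ st.2 then x1 else st.2))) st l)
    = some (l.foldl (fun (st : Int × Int) p =>
        ((if st.1 ≤ p.getD 1 0 then p.getD 1 0 else st.1),
         (if p.getD 1 0 ≤ st.2 then p.getD 1 0 else st.2))) st) := by
  induction l with
  | nil => intro st _; rfl
  | cons h t ih =>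
    intro st hl
    rw [List.foldlM_cons]
    simp only [pyGet1 h (hl h (by simp)), Option.pure_def, Option.bind_eq_bind,
      Option.bind_some] at ih ⊢
    rw [ih _ (fun p hp => hl p (by simp [hp])), List.foldl_cons]

theorem GetMaxMin_eq (p0 : List Int) (t : List (List Int)) (hp : ∀ p ∈ (p0 :: t), 2 ≤ p.length) :
    GetMaxMin_Y_X (p0 :: t) = some
      [[t.foldl (fun a p => max a (p.getD 0 0)) (p0.getD 0 0),
        t.foldl (fun a p => max a (p.getD 1 0)) (p0.getD 1 0)],
       [t.foldl (fun a p => min a (p.getD 0 0)) (p0.getD 0 0),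
        t.foldl (fun a p => min a (p.getD 1 0)) (p0.getD 1 0)]] := by
  have hne : ∀ p ∈ (p0 :: t), p ≠ [] := by
    intro p hp'
    have h2 := hp p hp'
    intro e
    rw [e] at h2
    simp at h2
  have h0 : p0 ≠ [] := hne p0 (by simp)
  have hmax := maxfold t p0 h0 (fun p hp' => hne p (by simp [hp']))
  have hmin := minfold t p0 h0 (fun p hp' => hne p (by simp [hp']))
  have g2 : PySem.List.pyGet? p0 1 = some (p0.getD 1 0) := pyGet1 p0 (hp p0 (by simp))
  have g3 : PySem.List.pyGet? (t.foldl (fun m x => if pyLtList m x then x else m) p0) 0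
      = some (t.foldl (fun a p => max a (p.getD 0 0)) (p0.getD 0 0)) := by
    rw [pyGet0 _ hmax.1, hmax.2]
  have g4 : PySem.List.pyGet? (t.foldl (fun m x => if pyLtList x m then x else m) p0) 0
      = some (t.foldl (fun a p => min a (p.getD 0 0)) (p0.getD 0 0)) := by
    rw [pyGet0 _ hmin.1, hmin.2]
  have g5 := xloopM (p0 :: t) ((p0.getD 1 0), (p0.getD 1 0)) hp
  simp only [Option.pure_def, Option.bind_eq_bind] at g5
  simp only [GetMaxMin_Y_X, pyMaxListA, pyMinListA, PySem.List.pyGet?_zero_cons, g2, g3, g4, g5,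
    Option.pure_def, Option.bind_eq_bind, Option.bind_some, xpair, List.foldl_cons,
    ite_self]

-- foldl min/max over a nonempty Int list: the result is a member and a lower/upper bound.
theorem foldl_min_spec (t : List Int) : ∀ h : Int,
    (t.foldl min h ∈ h :: t) ∧ (∀ x ∈ h :: t, t.foldl min h ≤ x) := by
  induction t with
  | nil => intro h; simp
  | cons a t ih =>
    intro h
    have ihu := ih (min h a)
    refine ⟨?_, ?_⟩
    · simp only [List.foldl_cons]
      rcases List.mem_cons.mp ihu.1 with hm | hm
      · rcases min_choice h a with hc | hc
        · rw [hm, hc]; simp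
        · rw [hm, hc]; simp
      · simp [hm]
    · intro x hx
      simp only [List.foldl_cons]
      rcases List.mem_cons.mp hx with rfl | hx
      · exact le_trans (ihu.2 _ (List.mem_cons_self ..)) (min_le_left _ _)
      · rcases List.mem_cons.mp hx with rfl | hx
        · exact le_trans (ihu.2 _ (List.mem_cons_self ..)) (min_le_right _ _)
        · exact ihu.2 _ (List.mem_cons_of_mem _ hx)

theorem foldl_max_spec (t : List Int) : ∀ h : Int,
    (t.foldl max h ∈ h :: t) ∧ (∀ x ∈ h :: t, x ≤ t.foldl max h) := by
  induction t with
  | nil => intro h; simp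
  | cons a t ih =>
    intro h
    have ihu := ih (max h a)
    refine ⟨?_, ?_⟩
    · simp only [List.foldl_cons]
      rcases List.mem_cons.mp ihu.1 with hm | hm
      · rcases max_choice h a with hc | hc
        · rw [hm, hc]; simp
        · rw [hm, hc]; simp
      · simp [hm]
    · intro x hx
      simp only [List.foldl_cons]
      rcases List.mem_cons.mp hx with rfl | hx
      · exact le_trans (le_max_left _ _) (ihu.2 _ (List.mem_cons_self ..))
      · rcases List.mem_cons.mp hx with rfl | hx
        · exact le_trans (le_max_right _ _) (ihu.2 _ (List.mem_cons_self ..))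
        · exact ihu.2 _ (List.mem_cons_of_mem _ hx)

-- in a ≤-sorted list, the last element bounds every member from above
theorem pairwise_le_getLast (m : Int) (l : List Int) : l.Pairwise (· ≤ ·) →
    l.getLast? = some m → ∀ x ∈ l, x ≤ m := by
  induction l with
  | nil => simp
  | cons a t ih =>
    intro hp hm x hx
    match t with
    | [] =>
      simp only [List.getLast?_singleton, Option.some.injEq] at hm
      simp at hx
      omega
    | b :: u =>
      have hm' : (b :: u).getLast? = some m := by rw [← hm]; rfl
      have hp' := (List.pairwise_cons.mp hp)
      have hmem : m ∈ b :: u := List.mem_of_getLast? hm'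
      rcases List.mem_cons.mp hx with rfl | hx
      · exact hp'.1 m hmem
      · exact ih hp'.2 hm' x hx

theorem head_sorted_min (h : Int) (t : List Int) :
    (PySem.List.sorted (h :: t) (fun v => v) false).head? = some (t.foldl min h) := by
  obtain ⟨m, u, he⟩ : ∃ m u, PySem.List.sorted (h :: t) (fun v => v) false = m :: u := by
    match hs : PySem.List.sorted (h :: t) (fun v => v) false with
    | [] => exact absurd ((PySem.List.sorted_eq_nil_iff _ _ _).mp hs) (by simp)
    | m :: u => exact ⟨m, u, rfl⟩
  have hle : ∀ y ∈ h :: t, m ≤ y := PySem.List.key_head_sorted_le _ _ he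
  have hmem : m ∈ h :: t := by
    rw [← PySem.List.mem_sorted (key := fun v => v) (rev := false), he]; simp
  have hspec := foldl_min_spec t h
  rw [he]
  simp only [List.head?_cons, Option.some.injEq]
  exact le_antisymm (hle _ hspec.1) (hspec.2 m hmem)

theorem last_sorted_max (h : Int) (t : List Int) :
    (PySem.List.sorted (h :: t) (fun v => v) false).getLast? = some (t.foldl max h) := by
  have hne : PySem.List.sorted (h :: t) (fun v => v) false ≠ [] := by
    intro hs
    exact absurd ((PySem.List.sorted_eq_nil_iff _ _ _).mp hs) (by simp)
  obtain ⟨m, hm⟩ : ∃ m, (PySem.List.sorted (h :: t) (fun v => v) false).getLast? = some m := by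
    match hs : (PySem.List.sorted (h :: t) (fun v => v) false).getLast? with
    | none => exact absurd (List.getLast?_eq_none_iff.mp hs) hne
    | some m => exact ⟨m, rfl⟩
  have hpw : (PySem.List.sorted (h :: t) (fun v => v) false).Pairwise (· ≤ ·) := by
    have := PySem.List.sorted_pairwise (xs := h :: t) (key := fun v => v)
    simpa using this
  have hub : ∀ x ∈ PySem.List.sorted (h :: t) (fun v => v) false, x ≤ m :=
    pairwise_le_getLast m _ hpw hm
  have hmem : m ∈ h :: t := by
    rw [← PySem.List.mem_sorted (key := fun v => v) (rev := false)]
    exact List.mem_of_getLast? hm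
  have hspec := foldl_max_spec t h
  rw [hm]
  have hfmem : t.foldl max h ∈ PySem.List.sorted (h :: t) (fun v => v) false := by
    rw [PySem.List.mem_sorted]; exact hspec.1
  exact congrArg some (le_antisymm (hspec.2 m hmem) (hub _ hfmem))

theorem bCenter_eq (p0 : List Int) (t : List (List Int)) :
    bCenter (p0 :: t) =
      [t.foldl (fun a p => min a (p.getD 0 0)) (p0.getD 0 0)
         + PySem.Int.floordiv (t.foldl (fun a p => max a (p.getD 0 0)) (p0.getD 0 0)
             - t.foldl (fun a p => min a (p.getD 0 0)) (p0.getD 0 0)) 2 - 1,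
       t.foldl (fun a p => min a (p.getD 1 0)) (p0.getD 1 0)
         + PySem.Int.floordiv (t.foldl (fun a p => max a (p.getD 1 0)) (p0.getD 1 0)
             - t.foldl (fun a p => min a (p.getD 1 0)) (p0.getD 1 0)) 2 + 1] := by
  simp only [bCenter, List.map_cons,
    head_sorted_min (p0.getD 0 0) (t.map (fun p => p.getD 0 0)),
    last_sorted_max (p0.getD 0 0) (t.map (fun p => p.getD 0 0)),
    head_sorted_min (p0.getD 1 0) (t.map (fun p => p.getD 1 0)),
    last_sorted_max (p0.getD 1 0) (t.map (fun p => p.getD 1 0)),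
    List.foldl_map]

theorem perObject (obj : List (List Int)) (hne : obj ≠ []) (hp : ∀ p ∈ obj, 2 ≤ p.length) :
    ∃ mm, GetMaxMin_Y_X obj = some mm ∧
      [(mm.getD 1 []).getD 0 0
         + PySem.Int.floordiv (((mm.getD 0 []).getD 0 0 - (mm.getD 1 []).getD 0 0) * 1) 2 - 1,
       (mm.getD 1 []).getD 1 0
         + PySem.Int.floordiv (((mm.getD 0 []).getD 1 0 - (mm.getD 1 []).getD 1 0) * 1) 2 + 1]
      = bCenter obj := by
  match obj, hne with
  | p0 :: t, _ =>
    refine ⟨_, GetMaxMin_eq p0 t hp, ?_⟩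
    rw [bCenter_eq]
    simp [mul_one]

theorem mainfold (l : List (List (List Int))) : ∀ (acc : List (List Int)),
    (∀ obj ∈ l, obj ≠ [] ∧ ∀ p ∈ obj, 2 ≤ p.length) →
    l.foldl (fun centers x =>
      match GetMaxMin_Y_X x with
      | none => centers
      | some mm =>
        centers ++ [[(mm.getD 1 []).getD 0 0
            + PySem.Int.floordiv (((mm.getD 0 []).getD 0 0 - (mm.getD 1 []).getD 0 0) * 1) 2 - 1,
          (mm.getD 1 []).getD 1 0
            + PySem.Int.floordiv (((mm.getD 0 []).getD 1 0 - (mm.getD 1 []).getD 1 0) * 1) 2 + 1]]) acc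
    = acc ++ l.map bCenter := by
  induction l with
  | nil => intro acc _; simp
  | cons h t ih =>
    intro acc hl
    obtain ⟨mm, hmm, hval⟩ := perObject h (hl h (by simp)).1 (hl h (by simp)).2
    simp only [List.foldl_cons, List.map_cons, hmm]
    rw [ih _ (fun obj ho => hl obj (by simp [ho])), hval]
    simp

-- ===== VERDICT (by name: the statement is the Claim_ definition above) =====
theorem GetCentrs_spec : Claim_equal_GetCentrs := by
  intro objects baseResolution endResolution _ hpre
  unfold Spec_GetCentrs GetCentrs GetCentrs_alt
  have h := mainfold objects [] hpre.2.2
  simpa using h
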